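-- pv_equiv track=rewrite | github.com/jonathanSimonney/advent-of-code | year_2019/ex16.py | compute_mult_pattern_for_num
-- ===== SOURCE A (Python) =====
-- from typing import TypedDict, List
--
-- class MultPattern(TypedDict):
--     index_to_add: List[int]
--     index_to_substract: List[int]
--
-- def compute_mult_pattern_for_num(index_num: int, size_num: int) -> MultPattern:
--     dict_acc: MultPattern = {"index_to_add": [], "index_to_substract": []}
--     pos = index_num
--     is_addition = True
--     while pos < size_num:
--         next_step_pos = pos + index_num + 1
--         if is_addition:
--             for i in range(pos, min(next_step_pos, size_num)):
--                 dict_acc["index_to_add"].append(i)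
--         else:
--             for i in range(pos, min(next_step_pos, size_num)):
--                 dict_acc["index_to_substract"].append(i)
--         pos = next_step_pos + index_num + 1
--         is_addition = not is_addition
--
--     return dict_acc
-- ===== SOURCE B (Python) =====
-- from typing import TypedDict, List
--
-- class MultPattern(TypedDict):
--     index_to_add: List[int]
--     index_to_substract: List[int]
--
-- def compute_mult_pattern_for_num(index_num: int, size_num: int) -> MultPattern:
--     index_to_add: List[int] = []
--     index_to_substract: List[int] = []
--     for i in range(index_num, size_num):
--         phase = ((i + 1) // (index_num + 1)) % 4
--         if phase == 1:
--             index_to_add.append(i)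
--         elif phase == 3:
--             index_to_substract.append(i)
--     return {"index_to_add": index_to_add, "index_to_substract": index_to_substract}
-- ===== Notes on version B (the rewrite author's own statement) =====
-- stated objective: simpler
-- what changed: Replaces the block-jumping while-loop with alternating add/subtract blocks by a single classifying pass over range(index_num, size_num) that assigns each position via the FFT phase formula ((i+1)//(index_num+1)) % 4.
import Mathlib
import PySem

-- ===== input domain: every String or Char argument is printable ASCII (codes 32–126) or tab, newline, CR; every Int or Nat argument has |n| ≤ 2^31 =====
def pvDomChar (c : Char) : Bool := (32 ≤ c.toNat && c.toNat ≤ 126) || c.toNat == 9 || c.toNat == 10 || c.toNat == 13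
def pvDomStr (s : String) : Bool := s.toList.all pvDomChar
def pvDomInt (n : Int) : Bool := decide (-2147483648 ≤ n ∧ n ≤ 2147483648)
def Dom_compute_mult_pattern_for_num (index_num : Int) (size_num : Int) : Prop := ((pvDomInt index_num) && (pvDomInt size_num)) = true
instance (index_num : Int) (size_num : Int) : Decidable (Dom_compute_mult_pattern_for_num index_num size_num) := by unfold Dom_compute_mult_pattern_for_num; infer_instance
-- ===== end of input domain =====

-- B replaces A's block-jumping while-loop by one classifying pass over all positions using the
-- phase formula ((i+1)//(index_num+1)) % 4; same cost, simpler structure.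

-- ===== PORT A =====
-- A's while loop; the fuel only makes the recursion total (the Python loop never terminates
-- outside Pre_, and the fuel is provably sufficient inside Pre_)
def pvALoop (index_num size_num : Int) : Nat → Int → Bool → List Int → List Int → List Int × List Int
  | 0, _, _, adds, subs => (adds, subs)
  | fuel + 1, pos, is_addition, adds, subs =>
    if pos < size_num then
      let next_step_pos := pos + index_num + 1
      let blk := PySem.List.pyRange pos (min next_step_pos size_num) 1
      if is_addition then
        pvALoop index_num size_num fuel (next_step_pos + index_num + 1) false (adds ++ blk) subs
      else
        pvALoop index_num size_num fuel (next_step_pos + index_num + 1) true adds (subs ++ blk)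
    else (adds, subs)

def compute_mult_pattern_for_num (index_num : Int) (size_num : Int) : List (String × List Int) :=
  let r := pvALoop index_num size_num (size_num - index_num).toNat index_num true [] []
  [("index_to_add", r.1), ("index_to_substract", r.2)]

-- ===== PORT B =====
def pvPhase (index_num i : Int) : Int :=
  PySem.Int.mod (PySem.Int.floordiv (i + 1) (index_num + 1)) 4

def compute_mult_pattern_for_num_alt (index_num : Int) (size_num : Int) : List (String × List Int) :=
  let r := (PySem.List.pyRange index_num size_num 1).foldl
    (fun (acc : List Int × List Int) i =>
      let phase := pvPhase index_num i
      if phase = 1 then (acc.1 ++ [i], acc.2)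
      else if phase = 3 then (acc.1, acc.2 ++ [i])
      else acc) ([], [])
  [("index_to_add", r.1), ("index_to_substract", r.2)]

-- ===== PRECONDITION & SPEC =====
-- Pre_ excludes exactly the inputs on which A's while loop never terminates
-- (index_num ≤ -1 with index_num < size_num: the step 2*(index_num+1) is ≤ 0), so A returns no value there.
def Pre_compute_mult_pattern_for_num (index_num : Int) (size_num : Int) : Prop :=
  0 ≤ index_num ∨ size_num ≤ index_num
instance (index_num : Int) (size_num : Int) : Decidable (Pre_compute_mult_pattern_for_num index_num size_num) := by unfold Pre_compute_mult_pattern_for_num; infer_instance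

def pvWitness_compute_mult_pattern_for_num : Int × Int := (1, 12)

def Spec_compute_mult_pattern_for_num (index_num : Int) (size_num : Int) (out : List (String × List Int)) : Prop := out = compute_mult_pattern_for_num_alt index_num size_num
instance (index_num : Int) (size_num : Int) (out : List (String × List Int)) : Decidable (Spec_compute_mult_pattern_for_num index_num size_num out) := by unfold Spec_compute_mult_pattern_for_num; infer_instance

-- ===== CLAIM (what is proved, stated in full; the proofs are below) =====
def Claim_equal_compute_mult_pattern_for_num : Prop := ∀ (index_num : Int) (size_num : Int), Dom_compute_mult_pattern_for_num index_num size_num → Pre_compute_mult_pattern_for_num index_num size_num → Spec_compute_mult_pattern_for_num index_num size_num (compute_mult_pattern_for_num index_num size_num)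

-- ===== LEMMAS AND PROOFS =====

-- B's fold appends the phase-1 and phase-3 filters of the traversed range.
lemma pvB_foldl (n : Int) (l : List Int) (a s : List Int) :
    l.foldl (fun (acc : List Int × List Int) i =>
      let phase := pvPhase n i
      if phase = 1 then (acc.1 ++ [i], acc.2)
      else if phase = 3 then (acc.1, acc.2 ++ [i])
      else acc) (a, s)
    = (a ++ l.filter (fun i => pvPhase n i = 1),
       s ++ l.filter (fun i => pvPhase n i = 3)) := by
  induction l generalizing a s with
  | nil => simp
  | cons x t ih =>
    by_cases h1 : pvPhase n x = 1
    · simp [List.foldl_cons, h1, ih]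
    · by_cases h3 : pvPhase n x = 3
      · simp [List.foldl_cons, h3, ih]
      · simp [List.foldl_cons, h1, h3, ih]

lemma pvPhase_eq (n i q : Int) (hn : 0 ≤ n) (h1 : q * (n + 1) ≤ i + 1) (h2 : i + 1 < (q + 1) * (n + 1)) :
    pvPhase n i = PySem.Int.mod q 4 := by
  unfold pvPhase
  rw [(PySem.Int.floordiv_eq_iff_of_pos (by omega)).mpr ⟨h1, h2⟩]

lemma pvPhase_block (n pos : Int) (j : Nat) (i : Int) (hn : 0 ≤ n)
    (hp : pos = n + 2 * j * (n + 1)) (hlo : pos ≤ i) (hhi : i < pos + n + 1) :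
    pvPhase n i = PySem.Int.mod (2 * j + 1) 4 := by
  subst hp
  refine pvPhase_eq n i (2 * j + 1) hn (by nlinarith) (by nlinarith)

lemma pvPhase_gap (n pos : Int) (j : Nat) (i : Int) (hn : 0 ≤ n)
    (hp : pos = n + 2 * j * (n + 1)) (hlo : pos + n + 1 ≤ i) (hhi : i < pos + 2 * (n + 1)) :
    pvPhase n i = PySem.Int.mod (2 * j + 2) 4 := by
  subst hp
  refine pvPhase_eq n i (2 * j + 2) hn (by nlinarith) (by nlinarith)

lemma pvMod4_odd (j : Nat) : PySem.Int.mod (2 * (j : Int) + 1) 4 = if j % 2 = 0 then 1 else 3 := by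
  rw [PySem.Int.mod_eq_emod_of_pos (by omega)]
  split <;> omega

lemma pvMod4_even (j : Nat) : PySem.Int.mod (2 * (j : Int) + 2) 4 = if j % 2 = 0 then 2 else 0 := by
  rw [PySem.Int.mod_eq_emod_of_pos (by omega)]
  split <;> omega

lemma pvFilter_nil_of (n v : Int) (l : List Int)
    (h : ∀ i ∈ l, pvPhase n i ≠ v) :
    l.filter (fun i => pvPhase n i = v) = [] := by
  refine List.filter_eq_nil_iff.mpr (fun a ha => ?_)
  simp [h a ha]

lemma pvFilter_self_of (n v : Int) (l : List Int)
    (h : ∀ i ∈ l, pvPhase n i = v) :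
    l.filter (fun i => pvPhase n i = v) = l :=
  List.filter_eq_self.mpr (fun a ha => by simp [h a ha])

-- main loop invariant: from the j-th block, A's loop appends the phase-1 / phase-3 filters
-- of the remaining range to the accumulators.
lemma pvALoop_eq (n m : Int) (hn : 0 ≤ n) :
    ∀ (fuel : Nat) (j : Nat) (adds subs : List Int),
      (m - (n + 2 * j * (n + 1))).toNat ≤ fuel →
      pvALoop n m fuel (n + 2 * j * (n + 1)) (decide (j % 2 = 0)) adds subs
        = (adds ++ (PySem.List.pyRange (n + 2 * j * (n + 1)) m 1).filter (fun i => pvPhase n i = 1),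
           subs ++ (PySem.List.pyRange (n + 2 * j * (n + 1)) m 1).filter (fun i => pvPhase n i = 3)) := by
  intro fuel
  induction fuel with
  | zero =>
    intro j adds subs hf
    rw [PySem.List.pyRange_one_eq_nil (by omega)]
    simp [pvALoop]
  | succ fuel ih =>
    intro j adds subs hf
    set pos := n + 2 * (j : Int) * (n + 1) with hpos
    clear_value pos
    by_cases hlt : pos < m
    · have hfuel' : (m - (pos + 2 * (n + 1))).toNat ≤ fuel := by
        have hp2 : n ≤ pos := hpos ▸ le_add_of_nonneg_right (by positivity)
        clear hpos
        omega
      have hsplit1 : PySem.List.pyRange pos m 1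
          = PySem.List.pyRange pos (min (pos + n + 1) m) 1 ++ PySem.List.pyRange (min (pos + n + 1) m) m 1 :=
        PySem.List.pyRange_one_append _ _ _ (le_min (by linarith) (le_of_lt hlt)) (min_le_right _ _)
      have htail : PySem.List.pyRange (min (pos + n + 1) m) m 1
          = PySem.List.pyRange (min (pos + n + 1) m) (min (pos + 2 * (n + 1)) m) 1
            ++ PySem.List.pyRange (pos + 2 * (n + 1)) m 1 := by
        by_cases h' : pos + 2 * (n + 1) ≤ m
        · rw [min_eq_left h']
          exact PySem.List.pyRange_one_append _ _ _ (le_trans (min_le_left _ _) (by linarith)) h'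
        · rw [min_eq_right (le_of_lt (not_le.mp h')),
              PySem.List.pyRange_one_eq_nil (le_of_lt (not_le.mp h'))]
          simp
      have hblk : ∀ i ∈ PySem.List.pyRange pos (min (pos + n + 1) m) 1,
          pvPhase n i = if j % 2 = 0 then 1 else 3 := by
        intro i hi
        rw [PySem.List.mem_pyRange_one] at hi
        rw [← pvMod4_odd j]
        exact pvPhase_block n pos j i hn hpos (by clear hpos; omega) (by clear hpos; omega)
      have hgap : ∀ i ∈ PySem.List.pyRange (min (pos + n + 1) m) (min (pos + 2 * (n + 1)) m) 1,
          pvPhase n i = if j % 2 = 0 then 2 else 0 := by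
        intro i hi
        rw [PySem.List.mem_pyRange_one] at hi
        rw [← pvMod4_even j]
        exact pvPhase_gap n pos j i hn hpos (by clear hpos; omega) (by clear hpos; omega)
      have hgap1 : (PySem.List.pyRange (min (pos + n + 1) m) (min (pos + 2 * (n + 1)) m) 1).filter
          (fun i => pvPhase n i = 1) = [] := by
        refine pvFilter_nil_of n 1 _ (fun i hi => ?_)
        rw [hgap i hi]; split <;> omega
      have hgap3 : (PySem.List.pyRange (min (pos + n + 1) m) (min (pos + 2 * (n + 1)) m) 1).filter
          (fun i => pvPhase n i = 3) = [] := by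
        refine pvFilter_nil_of n 3 _ (fun i hi => ?_)
        rw [hgap i hi]; split <;> omega
      have harg : pos + n + 1 + n + 1 = pos + 2 * (n + 1) := by ring
      have hpp : n + 2 * ((j + 1 : Nat) : Int) * (n + 1) = pos + 2 * (n + 1) := by
        rw [hpos]; push_cast; ring
      have hIH := ih (j + 1)
      rw [hpp] at hIH
      by_cases hj : j % 2 = 0
      · have hj1 : decide ((j + 1) % 2 = 0) = false := by rw [decide_eq_false_iff_not]; omega
        have hblkT := pvFilter_self_of n 1 _ (fun i hi => by rw [hblk i hi, if_pos hj])
        have hblkN := pvFilter_nil_of n 3 _ (fun i hi => by rw [hblk i hi, if_pos hj]; omega)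
        simp only [pvALoop, if_pos hlt, hj, decide_true, if_true]
        rw [harg, ← hj1, hIH (adds ++ PySem.List.pyRange pos (min (pos + n + 1) m) 1) subs hfuel']
        rw [hsplit1, htail]
        simp [List.filter_append, hblkT, hblkN, hgap1, hgap3, List.append_assoc]
      · have hj1 : decide ((j + 1) % 2 = 0) = true := by rw [decide_eq_true_eq]; omega
        have hjb : decide (j % 2 = 0) = false := by simp [hj]
        have hblkT := pvFilter_self_of n 3 _ (fun i hi => by rw [hblk i hi, if_neg hj])
        have hblkN := pvFilter_nil_of n 1 _ (fun i hi => by rw [hblk i hi, if_neg hj]; omega)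
        simp only [pvALoop, if_pos hlt, hjb, Bool.false_eq_true, if_false]
        rw [harg, ← hj1, hIH adds (subs ++ PySem.List.pyRange pos (min (pos + n + 1) m) 1) hfuel']
        rw [hsplit1, htail]
        simp [List.filter_append, hblkT, hblkN, hgap1, hgap3, List.append_assoc]
    · rw [PySem.List.pyRange_one_eq_nil (by omega)]
      simp [pvALoop, hlt]

-- ===== VERDICT (by name: the statement is the Claim_ definition above) =====
theorem compute_mult_pattern_for_num_spec : Claim_equal_compute_mult_pattern_for_num := by
  intro n m _ hpre
  show _ = _
  unfold compute_mult_pattern_for_num compute_mult_pattern_for_num_alt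
  rw [pvB_foldl]
  by_cases hm : n < m
  · have hn : 0 ≤ n := by rcases hpre with h | h <;> omega
    have h0 : n + 2 * ((0 : Nat) : Int) * (n + 1) = n := by push_cast; ring
    have := pvALoop_eq n m hn (m - n).toNat 0 [] [] (by rw [h0])
    rw [h0] at this
    simp only [Nat.zero_mod, decide_true] at this
    rw [this]
  · have hz : (m - n).toNat = 0 := by omega
    rw [hz, PySem.List.pyRange_one_eq_nil (by omega)]
    simp [pvALoop]
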